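-- pv_equiv track=rewrite | github.com/Jirehlov/VIB_Snapshots | utils/87.py | count_pattern_changes
-- ===== SOURCE A (Python) =====
-- from collections import defaultdict
--
-- def count_pattern_changes(subject_patterns):
--     change_counts = defaultdict(int)
--     for subject, patterns_and_titles in subject_patterns.items():
--         changes = 0
--         if len(patterns_and_titles) > 1:
--             for i in range(len(patterns_and_titles) - 1):
--                 if patterns_and_titles[i][0] != patterns_and_titles[i+1][0]:
--                     changes += 1
--         change_counts[subject] = (changes, subject_patterns[subject][0][1])
--     return change_counts
-- ===== SOURCE B (Python) =====
-- def count_pattern_changes(subject_patterns):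
--     def changes(firsts):
--         # divide and conquer: split at the midpoint, count changes in each half,
--         # plus one change if the halves meet with different patterns
--         n = len(firsts)
--         if n < 2:
--             return 0
--         mid = n // 2
--         left, right = firsts[:mid], firsts[mid:]
--         return changes(left) + changes(right) + (1 if left[-1] != right[0] else 0)
--
--     return {subject: (changes([p for p, _ in pt]), pt[0][1])
--             for subject, pt in subject_patterns.items()}
-- ===== Notes on version B (the rewrite author's own statement) =====
-- stated objective: alternative
-- what changed: Replaces A's index-based linear scan over adjacent pairs with a divide-and-conquer recursion: split the pattern list at the midpoint, count changes in each half recursively, add 1 if the halves meet with different patterns; Pre_ only excludes inputs where both programs raise IndexError (a subject with an empty pattern list) and duplicate subject keys, which a real Python dict cannot carry.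
import Mathlib
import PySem

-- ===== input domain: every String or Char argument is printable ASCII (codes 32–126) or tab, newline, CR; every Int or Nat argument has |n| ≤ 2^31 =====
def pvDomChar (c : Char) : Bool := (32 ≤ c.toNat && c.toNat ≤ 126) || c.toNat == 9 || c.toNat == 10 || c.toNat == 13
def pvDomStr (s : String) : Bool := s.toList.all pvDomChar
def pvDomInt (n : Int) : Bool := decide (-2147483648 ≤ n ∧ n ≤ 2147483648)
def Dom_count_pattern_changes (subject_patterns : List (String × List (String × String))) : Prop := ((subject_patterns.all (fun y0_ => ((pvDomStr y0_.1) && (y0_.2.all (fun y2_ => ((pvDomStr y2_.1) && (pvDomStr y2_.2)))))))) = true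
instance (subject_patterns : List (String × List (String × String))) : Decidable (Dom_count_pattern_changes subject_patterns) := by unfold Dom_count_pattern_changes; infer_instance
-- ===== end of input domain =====

-- B replaces A's linear index-based adjacent-pair scan with a divide-and-conquer recursion
-- (split at the midpoint, recurse on the halves, +1 if the halves meet with different patterns);
-- same cost, genuinely different algorithmic structure.

-- ===== PORT A =====
def count_pattern_changes (subject_patterns : List (String × List (String × String))) : List (String × Int × String) :=
  (subject_patterns.foldl
    (fun (change_counts : PySem.Dict String (Int × String)) kv =>
      let patterns_and_titles := kv.2
      let changes : Int :=
        if patterns_and_titles.length > 1 then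
          (PySem.List.pyRange 0 ((patterns_and_titles.length : Int) - 1) 1).foldl
            (fun changes i =>
              if (PySem.List.pyGetD patterns_and_titles i ("", "")).1 ≠
                 (PySem.List.pyGetD patterns_and_titles (i + 1) ("", "")).1
              then changes + 1 else changes) 0
        else 0
      -- subject_patterns[subject][0][1]; pyGetD's default is reached only outside Pre_ (Python raises IndexError there)
      let title := (PySem.List.pyGetD ((PySem.Dict.mk subject_patterns).getD kv.1 []) 0 ("", "")).2
      change_counts.insert kv.1 (changes, title))
    PySem.Dict.empty).items

-- ===== PORT B =====
-- Source B's 'changes': divide and conquer on the list of first components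
def pvChanges (l : List String) : Int :=
  if l.length < 2 then 0
  else
    let mid := l.length / 2
    pvChanges (l.take mid) + pvChanges (l.drop mid) +
      (if (l.take mid).getLastD "" ≠ (l.drop mid).headD "" then 1 else 0)
termination_by l.length
decreasing_by
  · simp only [List.length_take]; omega
  · simp only [List.length_drop]; omega

def count_pattern_changes_alt (subject_patterns : List (String × List (String × String))) : List (String × Int × String) :=
  (subject_patterns.foldl
    (fun (change_counts : PySem.Dict String (Int × String)) kv =>
      change_counts.insert kv.1
        (pvChanges (kv.2.map Prod.fst), (PySem.List.pyGetD kv.2 0 ("", "")).2))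
    PySem.Dict.empty).items

-- ===== PRECONDITION & SPEC =====
-- Pre_ excludes (a) any subject with an empty pattern list — there the Python A (and B) raises
-- IndexError on patterns_and_titles[0][1] — and (b) duplicate subject keys, which the assoc-list
-- encoding admits but a real Python dict (A's actual argument type) can never carry.
def Pre_count_pattern_changes (subject_patterns : List (String × List (String × String))) : Prop :=
  (subject_patterns.map Prod.fst).Nodup ∧ ∀ kv ∈ subject_patterns, kv.2 ≠ []
instance (subject_patterns : List (String × List (String × String))) : Decidable (Pre_count_pattern_changes subject_patterns) := by unfold Pre_count_pattern_changes; infer_instance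

def pvWitness_count_pattern_changes : (List (String × List (String × String))) :=
  [("math", [("p", "t1"), ("q", "t2"), ("q", "t3")]), ("art", [("r", "t4")])]

def Spec_count_pattern_changes (subject_patterns : List (String × List (String × String))) (out : List (String × Int × String)) : Prop := out = count_pattern_changes_alt subject_patterns
instance (subject_patterns : List (String × List (String × String))) (out : List (String × Int × String)) : Decidable (Spec_count_pattern_changes subject_patterns out) := by unfold Spec_count_pattern_changes; infer_instance

-- ===== CLAIM (what is proved, stated in full; the proofs are below) =====
def Claim_equal_count_pattern_changes : Prop := ∀ (subject_patterns : List (String × List (String × String))), Dom_count_pattern_changes subject_patterns → Pre_count_pattern_changes subject_patterns → Spec_count_pattern_changes subject_patterns (count_pattern_changes subject_patterns)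

-- ===== LEMMAS AND PROOFS =====

-- structural count of adjacent first-component changes (what A's index loop computes)
def pvAdj : List (String × String) → Int
  | [] => 0
  | [_] => 0
  | a :: b :: rest => (if a.1 = b.1 then 0 else 1) + pvAdj (b :: rest)

-- the same count over a plain list of strings
def pvAdjS : List String → Int
  | [] => 0
  | [_] => 0
  | a :: b :: rest => (if a = b then 0 else 1) + pvAdjS (b :: rest)

lemma pvAdjS_map_fst : ∀ pt : List (String × String), pvAdjS (pt.map Prod.fst) = pvAdj pt
  | [] => rfl
  | [_] => rfl
  | a :: b :: rest => by
    simp only [List.map_cons, pvAdjS, pvAdj]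
    rw [← List.map_cons, pvAdjS_map_fst (b :: rest)]

lemma pvAdjS_append : ∀ (l r : List String), l ≠ [] → r ≠ [] →
    pvAdjS (l ++ r) = pvAdjS l + pvAdjS r + (if l.getLastD "" ≠ r.headD "" then 1 else 0)
  | [], _, hl, _ => absurd rfl hl
  | [a], r, _, hr => by
    match r with
    | [] => exact absurd rfl hr
    | b :: r' =>
      simp only [List.singleton_append, pvAdjS, List.getLastD_eq_getLast?, List.getLast?_singleton,
        Option.getD_some, List.headD_cons]
      by_cases h : a = b <;> simp [h] <;> ring
  | a :: c :: l', r, _, hr => by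
    have ih := pvAdjS_append (c :: l') r (by simp) hr
    simp only [List.cons_append, pvAdjS] at *
    rw [ih]
    simp only [List.getLastD_eq_getLast?, List.getLast?_cons_cons]
    ring

lemma pvChanges_eq_adjS (l : List String) : pvChanges l = pvAdjS l := by
  induction l using pvChanges.induct with
  | case1 l h =>
    rw [pvChanges, if_pos h]
    match l, h with
    | [], _ => rfl
    | [_], _ => rfl
  | case2 l h mid ih1 ih2 =>
    rw [pvChanges, if_neg h]
    show pvChanges (l.take mid) + pvChanges (l.drop mid) +
        (if (l.take mid).getLastD "" ≠ (l.drop mid).headD "" then 1 else 0) = pvAdjS l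
    have hm : mid = l.length / 2 := rfl
    rw [ih1, ih2]
    have htake : l.take mid ≠ [] := by
      intro hc
      have := congrArg List.length hc
      simp only [List.length_take, List.length_nil] at this
      omega
    have hdrop : l.drop mid ≠ [] := by
      intro hc
      have := congrArg List.length hc
      simp only [List.length_drop, List.length_nil] at this
      omega
    have hsplit := pvAdjS_append (l.take mid) (l.drop mid) htake hdrop
    rw [List.take_append_drop] at hsplit
    rw [hsplit]

lemma pvAdj_nonneg : ∀ pt : List (String × String), 0 ≤ pvAdj pt
  | [] => le_refl 0
  | [_] => le_refl 0
  | a :: b :: rest => by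
    have := pvAdj_nonneg (b :: rest)
    simp only [pvAdj]; split <;> omega

-- A's inner loop, over Nat indices, equals pvAdj
lemma loop_nat (d : String × String) :
    ∀ (pt : List (String × String)) (c0 : Int),
    (List.range (pt.length - 1)).foldl
      (fun c k => if (pt.getD k d).1 ≠ (pt.getD (k + 1) d).1 then c + 1 else c) c0
    = c0 + pvAdj pt
  | [], c0 => by simp [pvAdj]
  | [a], c0 => by simp [pvAdj]
  | a :: b :: rest, c0 => by
    have ih := loop_nat d (b :: rest)
    simp only [List.length_cons, Nat.add_sub_cancel] at *
    rw [List.range_succ_eq_map, List.foldl_cons, List.foldl_map]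
    simp only [List.getD_cons_zero, List.getD_cons_succ, Nat.succ_eq_add_one]
    simp only [List.getD_cons_succ] at ih
    rw [ih]
    simp only [pvAdj]
    by_cases h : a.1 = b.1 <;> simp [h] <;> ring

-- A's guarded loop expression equals pvAdj
lemma changes_eq (pt : List (String × String)) :
    (if pt.length > 1 then
        (PySem.List.pyRange 0 ((pt.length : Int) - 1) 1).foldl
          (fun changes i =>
            if (PySem.List.pyGetD pt i ("", "")).1 ≠
               (PySem.List.pyGetD pt (i + 1) ("", "")).1
            then changes + 1 else changes) 0
      else (0 : Int))
    = pvAdj pt := by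
  match pt with
  | [] => simp [pvAdj]
  | [a] => simp [pvAdj]
  | a :: b :: rest =>
    have h2 : (a :: b :: rest).length > 1 := by simp
    rw [if_pos h2]
    have hlen : ((((a :: b :: rest).length : Int) - 1) - 0).toNat = (a :: b :: rest).length - 1 := by
      omega
    rw [PySem.List.pyRange_one, hlen, List.foldl_map]
    simp only [zero_add]
    have hcast : ∀ (c : Int) (k : Nat),
        (if (PySem.List.pyGetD (a :: b :: rest) ((k : Nat) : Int) ("", "")).1 ≠
            (PySem.List.pyGetD (a :: b :: rest) (((k : Nat) : Int) + 1) ("", "")).1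
         then c + 1 else c)
        = (if ((a :: b :: rest).getD k ("", "")).1 ≠ ((a :: b :: rest).getD (k + 1) ("", "")).1
           then c + 1 else c) := by
      intro c k
      have : (((k : Nat) : Int) + 1) = (((k + 1 : Nat)) : Int) := by push_cast; ring
      rw [this, PySem.List.pyGetD_natCast, PySem.List.pyGetD_natCast]
    simp only [hcast]
    rw [loop_nat ("", "") (a :: b :: rest) 0]
    ring

lemma title_eq (sp : List (String × List (String × String)))
    (hnd : (sp.map Prod.fst).Nodup) (kv : String × List (String × String)) (hmem : kv ∈ sp) :
    (PySem.Dict.mk sp).getD kv.1 [] = kv.2 := by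
  apply PySem.Dict.getD_of_mem_items
  · exact hmem
  · simpa [PySem.Dict.keys] using hnd

-- ===== VERDICT =====
theorem count_pattern_changes_spec : Claim_equal_count_pattern_changes := by
  intro sp _hdom hpre
  unfold Spec_count_pattern_changes count_pattern_changes count_pattern_changes_alt
  congr 1
  apply PySem.List.foldl_congr_mem
  intro acc kv hmem
  simp only
  rw [changes_eq kv.2, title_eq sp hpre.1 kv hmem,
    pvChanges_eq_adjS, pvAdjS_map_fst]
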